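-- pv_equiv track=rewrite | github.com/menelly/adaptive_interpreter | data_processing/sequence_mismatch_handler.py | _is_radical_change
-- ===== SOURCE A (Python) =====
-- def _is_radical_change(aa1: str, aa2: str) -> bool:
--     """Check if amino acid change is radical (different properties)"""
--     # Amino acid property groups
--     hydrophobic = set('AILMFWYV')
--     polar = set('NQST')
--     charged_pos = set('KRH')
--     charged_neg = set('DE')
--     special = set('CGP')
--
--     groups = [hydrophobic, polar, charged_pos, charged_neg, special]
--
--     # Find which groups each amino acid belongs to
--     aa1_groups = [i for i, group in enumerate(groups) if aa1 in group]
--     aa2_groups = [i for i, group in enumerate(groups) if aa2 in group]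
--
--     # Radical if they don't share any property groups
--     return len(set(aa1_groups) & set(aa2_groups)) == 0
-- ===== SOURCE B (Python) =====
-- # Precomputed relation: the set of all ordered conservative (same-group) amino
-- # acid pairs; a change is radical iff the ordered pair is not in this relation.
-- _CONSERVATIVE_PAIRS = set()
-- for _g in ('AILMFWYV', 'NQST', 'KRH', 'DE', 'CGP'):
--     for _a in _g:
--         for _b in _g:
--             _CONSERVATIVE_PAIRS.add((_a, _b))
--
-- def _is_radical_change(aa1: str, aa2: str) -> bool:
--     return (aa1, aa2) not in _CONSERVATIVE_PAIRS
-- ===== Notes on version B (the rewrite author's own statement) =====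
-- stated objective: alternative
-- what changed: Instead of classifying each amino acid into property groups and intersecting the two group-index sets, B precomputes the binary relation of all 102 ordered same-group pairs once and answers with a single membership test of the ordered pair (aa1, aa2).
import Mathlib
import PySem

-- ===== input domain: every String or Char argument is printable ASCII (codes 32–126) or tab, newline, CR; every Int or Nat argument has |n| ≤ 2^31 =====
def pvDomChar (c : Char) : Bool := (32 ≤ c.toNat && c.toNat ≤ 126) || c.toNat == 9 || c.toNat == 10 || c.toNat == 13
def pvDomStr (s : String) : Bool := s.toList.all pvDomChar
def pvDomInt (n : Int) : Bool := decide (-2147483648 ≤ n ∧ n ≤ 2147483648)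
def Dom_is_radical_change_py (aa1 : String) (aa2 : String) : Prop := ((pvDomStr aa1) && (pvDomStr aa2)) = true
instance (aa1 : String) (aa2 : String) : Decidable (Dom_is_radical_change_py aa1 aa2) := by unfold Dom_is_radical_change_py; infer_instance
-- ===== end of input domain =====

-- B replaces A's per-call group classification and set intersection by one precomputed
-- relation of all ordered same-group pairs and a single membership test (objective: alternative).

-- ===== PORT A =====
def is_radical_change_py (aa1 : String) (aa2 : String) : Bool :=
  let hydrophobic : PySem.Set String := PySem.Set.ofList ("AILMFWYV".toList.map (fun c => String.ofList [c]))
  let polar : PySem.Set String := PySem.Set.ofList ("NQST".toList.map (fun c => String.ofList [c]))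
  let charged_pos : PySem.Set String := PySem.Set.ofList ("KRH".toList.map (fun c => String.ofList [c]))
  let charged_neg : PySem.Set String := PySem.Set.ofList ("DE".toList.map (fun c => String.ofList [c]))
  let special : PySem.Set String := PySem.Set.ofList ("CGP".toList.map (fun c => String.ofList [c]))
  let groups : List (PySem.Set String) := [hydrophobic, polar, charged_pos, charged_neg, special]
  let aa1_groups : List Int :=
    (PySem.List.enumerate groups).filterMap (fun p => if PySem.Set.contains p.2 aa1 then some p.1 else none)
  let aa2_groups : List Int :=
    (PySem.List.enumerate groups).filterMap (fun p => if PySem.Set.contains p.2 aa2 then some p.1 else none)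
  PySem.Set.len (PySem.Set.inter (PySem.Set.ofList aa1_groups) (PySem.Set.ofList aa2_groups)) == 0

-- ===== PORT B =====
-- module-level set of all ordered conservative (same-group) pairs
def pvConservativePairs : PySem.Set (String × String) :=
  ["AILMFWYV", "NQST", "KRH", "DE", "CGP"].foldl
    (fun s g => g.toList.foldl
      (fun s a => g.toList.foldl
        (fun s b => PySem.Set.add s (String.ofList [a], String.ofList [b])) s) s)
    PySem.Set.empty

def is_radical_change_py_alt (aa1 : String) (aa2 : String) : Bool :=
  !(PySem.Set.contains pvConservativePairs (aa1, aa2))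

-- ===== PRECONDITION & SPEC =====
def Spec_is_radical_change_py (aa1 : String) (aa2 : String) (out : Bool) : Prop := out = is_radical_change_py_alt aa1 aa2
instance (aa1 : String) (aa2 : String) (out : Bool) : Decidable (Spec_is_radical_change_py aa1 aa2 out) := by unfold Spec_is_radical_change_py; infer_instance

-- ===== CLAIM =====
def Claim_equal_is_radical_change_py : Prop := ∀ (aa1 : String) (aa2 : String), Dom_is_radical_change_py aa1 aa2 → Spec_is_radical_change_py aa1 aa2 (is_radical_change_py aa1 aa2)

-- ===== LEMMAS AND PROOFS =====

def pvLetters : List String := ["A", "I", "L", "M", "F", "W", "Y", "V", "N", "Q", "S", "T", "K", "R", "H", "D", "E", "C", "G", "P"]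

-- the list of group indices A computes for one amino acid
def pvAGroupsOf (s : String) : List Int :=
  (PySem.List.enumerate
      [PySem.Set.ofList ("AILMFWYV".toList.map (fun c => String.ofList [c])),
       PySem.Set.ofList ("NQST".toList.map (fun c => String.ofList [c])),
       PySem.Set.ofList ("KRH".toList.map (fun c => String.ofList [c])),
       PySem.Set.ofList ("DE".toList.map (fun c => String.ofList [c])),
       PySem.Set.ofList ("CGP".toList.map (fun c => String.ofList [c]))]).filterMap
    (fun p => if PySem.Set.contains p.2 s then some p.1 else none)

theorem pv_A_eq (aa1 aa2 : String) :
    is_radical_change_py aa1 aa2 =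
      (PySem.Set.len (PySem.Set.inter (PySem.Set.ofList (pvAGroupsOf aa1)) (PySem.Set.ofList (pvAGroupsOf aa2))) == 0) := rfl

-- a string outside the 20 amino-acid letters is in no group
theorem pv_groups_nonletter (s : String) (h : s ∉ pvLetters) : pvAGroupsOf s = [] := by
  simp [pvLetters] at h
  obtain ⟨hA, hI, hL, hM, hF, hW, hY, hV, hN, hQ, hS, hT, hK, hR, hH, hD, hE, hC, hG, hP⟩ := h
  unfold pvAGroupsOf
  simp [PySem.List.enumerate, List.filterMap, PySem.Set.contains, PySem.Set.ofList, PySem.Set.add,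
    hA, hI, hL, hM, hF, hW, hY, hV, hN, hQ, hS, hT, hK, hR, hH, hD, hE, hC, hG, hP]

-- the conservative-pair set, as a literal list
def pvPairsList : List (String × String) := [("A", "A"), ("A", "I"), ("A", "L"), ("A", "M"), ("A", "F"), ("A", "W"), ("A", "Y"), ("A", "V"), ("I", "A"), ("I", "I"), ("I", "L"), ("I", "M"), ("I", "F"), ("I", "W"), ("I", "Y"), ("I", "V"), ("L", "A"), ("L", "I"), ("L", "L"), ("L", "M"), ("L", "F"), ("L", "W"), ("L", "Y"), ("L", "V"), ("M", "A"), ("M", "I"), ("M", "L"), ("M", "M"), ("M", "F"), ("M", "W"), ("M", "Y"), ("M", "V"), ("F", "A"), ("F", "I"), ("F", "L"), ("F", "M"), ("F", "F"), ("F", "W"), ("F", "Y"), ("F", "V"), ("W", "A"), ("W", "I"), ("W", "L"), ("W", "M"), ("W", "F"), ("W", "W"), ("W", "Y"), ("W", "V"), ("Y", "A"), ("Y", "I"), ("Y", "L"), ("Y", "M"), ("Y", "F"), ("Y", "W"), ("Y", "Y"), ("Y", "V"), ("V", "A"), ("V", "I"), ("V", "L"), ("V", "M"), ("V", "F"), ("V",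 "W"), ("V", "Y"), ("V", "V"), ("N", "N"), ("N", "Q"), ("N", "S"), ("N", "T"), ("Q", "N"), ("Q", "Q"), ("Q", "S"), ("Q", "T"), ("S", "N"), ("S", "Q"), ("S", "S"), ("S", "T"), ("T", "N"), ("T", "Q"), ("T", "S"), ("T", "T"), ("K", "K"), ("K", "R"), ("K", "H"), ("R", "K"), ("R", "R"), ("R", "H"), ("H", "K"), ("H", "R"), ("H", "H"), ("D", "D"), ("D", "E"), ("E", "D"), ("E", "E"), ("C", "C"), ("C", "G"), ("C", "P"), ("G", "C"), ("G", "G"), ("G", "P"), ("P", "C"), ("P", "G"), ("P", "P")]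

set_option maxRecDepth 16384 in
theorem pv_pairs_eq : pvConservativePairs = pvPairsList := by decide

-- a pair with a component outside the 20 letters is not a conservative pair
set_option maxRecDepth 16384 in
theorem pv_pairs_fst (s t : String) (h : s ∉ pvLetters) :
    PySem.Set.contains pvConservativePairs (s, t) = false := by
  simp [pvLetters] at h
  obtain ⟨hA, hI, hL, hM, hF, hW, hY, hV, hN, hQ, hS, hT, hK, hR, hH, hD, hE, hC, hG, hP⟩ := h
  rw [pv_pairs_eq]
  simp [pvPairsList, PySem.Set.contains, Prod.ext_iff,
    hA, hI, hL, hM, hF, hW, hY, hV, hN, hQ, hS, hT, hK, hR, hH, hD, hE, hC, hG, hP]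

set_option maxRecDepth 16384 in
theorem pv_pairs_snd (s t : String) (h : t ∉ pvLetters) :
    PySem.Set.contains pvConservativePairs (s, t) = false := by
  simp [pvLetters] at h
  obtain ⟨hA, hI, hL, hM, hF, hW, hY, hV, hN, hQ, hS, hT, hK, hR, hH, hD, hE, hC, hG, hP⟩ := h
  rw [pv_pairs_eq]
  simp [pvPairsList, PySem.Set.contains, Prod.ext_iff,
    hA, hI, hL, hM, hF, hW, hY, hV, hN, hQ, hS, hT, hK, hR, hH, hD, hE, hC, hG, hP]

set_option maxHeartbeats 2000000 in
set_option maxRecDepth 16384 in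
theorem pv_letters_agree : ∀ s ∈ pvLetters, ∀ t ∈ pvLetters,
    is_radical_change_py s t = is_radical_change_py_alt s t := by decide

-- ===== VERDICT =====
theorem is_radical_change_py_spec : Claim_equal_is_radical_change_py := by
  intro aa1 aa2 _
  unfold Spec_is_radical_change_py
  by_cases h1 : aa1 ∈ pvLetters
  · by_cases h2 : aa2 ∈ pvLetters
    · exact pv_letters_agree aa1 h1 aa2 h2
    · rw [pv_A_eq, is_radical_change_py_alt, pv_pairs_snd aa1 aa2 h2,
        pv_groups_nonletter aa2 h2]
      simp [PySem.Set.inter, PySem.Set.ofList, PySem.Set.len, PySem.Set.contains,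
        PySem.Set.empty]
  · rw [pv_A_eq, is_radical_change_py_alt, pv_pairs_fst aa1 aa2 h1,
      pv_groups_nonletter aa1 h1]
    simp [PySem.Set.inter, PySem.Set.ofList, PySem.Set.len]
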